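-- pv_equiv track=rewrite | github.com/Black-fox17/DSA | src/captcha.py | check_common_elevation
-- ===== SOURCE A (Python) =====
-- def check_common_elevation(array:list) -> int:
--     highest_elevation = array[0]
--
--     counts = []
--     for i in range(len(array)):
--         if array[i] not in counts:
--             counts.append(array[i])
--             c = 0
--             for j in range(len(array)):
--                 if array[i] == array[j]:
--                     c += 1
--                 else:
--                     pass
--             if c > 1:
--                 if highest_elevation < array[i]:
--                     highest_elevation = array[i]
--     return highest_elevation
-- ===== SOURCE B (Python) =====
-- def check_common_elevation(array: list) -> int:
--     result = array[0]
--     counts = {}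
--     for x in array:
--         counts[x] = counts.get(x, 0) + 1
--     for x, c in counts.items():
--         if c > 1 and x > result:
--             result = x
--     return result
-- ===== Notes on version B (the rewrite author's own statement) =====
-- stated objective: faster
-- what changed: replaces the O(n^2) 'for each new value rescan the whole array' nested loops with a single-pass dict counter followed by one scan over its items
import Mathlib
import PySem

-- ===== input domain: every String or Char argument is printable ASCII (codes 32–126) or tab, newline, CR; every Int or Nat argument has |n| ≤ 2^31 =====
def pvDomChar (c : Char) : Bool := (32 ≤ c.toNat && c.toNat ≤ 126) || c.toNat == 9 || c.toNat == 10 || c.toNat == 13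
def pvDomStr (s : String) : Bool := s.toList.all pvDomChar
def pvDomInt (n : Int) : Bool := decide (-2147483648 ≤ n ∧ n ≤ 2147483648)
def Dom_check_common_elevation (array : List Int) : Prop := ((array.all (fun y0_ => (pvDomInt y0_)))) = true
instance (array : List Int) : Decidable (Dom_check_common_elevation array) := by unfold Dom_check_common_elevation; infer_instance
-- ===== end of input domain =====

-- B replaces A's O(n^2) nested rescans with a one-pass dict counter plus one scan over its items (objective: faster).

-- ===== PORT A =====
-- array[0] raises IndexError on []; Pre_ excludes the empty list, so .getD 0 is never taken.
def check_common_elevation (array : List Int) : Int :=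
  let highest := (PySem.List.pyGet? array 0).getD 0
  (PySem.List.pyRange 0 (array.length : Int) 1).foldl
    (fun (p : List Int × Int) i =>
      let x := PySem.List.pyGetD array i 0
      if x ∈ p.1 then p
      else
        let counts := p.1 ++ [x]
        let c := (PySem.List.pyRange 0 (array.length : Int) 1).foldl
          (fun c j => if x = PySem.List.pyGetD array j 0 then c + 1 else c) (0 : Int)
        if c > 1 then (if p.2 < x then (counts, x) else (counts, p.2)) else (counts, p.2))
    ([], highest) |>.2

-- ===== PORT B =====
def check_common_elevation_alt (array : List Int) : Int :=
  let result := (PySem.List.pyGet? array 0).getD 0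
  let counts := array.foldl (fun (d : PySem.Dict Int Int) x => d.insert x (d.getD x 0 + 1)) PySem.Dict.empty
  counts.items.foldl (fun r p => if p.2 > 1 ∧ p.1 > r then p.1 else r) result

-- ===== PRECONDITION & SPEC =====
-- Pre_ excludes only the empty list, on which A (array[0]) raises IndexError.
def Pre_check_common_elevation (array : List Int) : Prop := array ≠ []
instance (array : List Int) : Decidable (Pre_check_common_elevation array) := by unfold Pre_check_common_elevation; infer_instance
def pvWitness_check_common_elevation : List Int := [3, 1, 3, 2]
def Spec_check_common_elevation (array : List Int) (out : Int) : Prop := out = check_common_elevation_alt array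
instance (array : List Int) (out : Int) : Decidable (Spec_check_common_elevation array out) := by unfold Spec_check_common_elevation; infer_instance

-- ===== CLAIM (what is proved, stated in full; the proofs are below) =====
def Claim_equal_check_common_elevation : Prop := ∀ (array : List Int), Dom_check_common_elevation array → Pre_check_common_elevation array → Spec_check_common_elevation array (check_common_elevation array)

-- ===== LEMMAS AND PROOFS =====

-- the common step: update the running max h with x iff x occurs more than once
def pvG (cnt : Int → Nat) (h x : Int) : Int := if 1 < cnt x then (if h < x then x else h) else h

-- A's step on state (seen-values list, running max)
def pvStepA (cnt : Int → Nat) (p : List Int × Int) (x : Int) : List Int × Int :=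
  if x ∈ p.1 then p else (p.1 ++ [x], pvG cnt p.2 x)

-- the elements of ys not in s, first occurrences only (A's effective iteration order)
def pvNew (s : List Int) : List Int → List Int
  | [] => []
  | x :: ys => if x ∈ s then pvNew s ys else x :: pvNew (s ++ [x]) ys

theorem pvFoldCount (x : Int) : ∀ (l : List Int) (c : Int),
    l.foldl (fun c y => if x = y then c + 1 else c) c = c + (l.count x : Int) := by
  intro l
  induction l with
  | nil => simp
  | cons y l ih =>
    intro c
    rw [List.foldl_cons, ih]
    by_cases h : x = y
    · subst h
      rw [if_pos rfl, List.count_cons_self]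
      push_cast; ring
    · rw [if_neg h, List.count_cons_of_ne (Ne.symm h)]

theorem pvLemA (cnt : Int → Nat) : ∀ (ys : List Int) (s : List Int) (h : Int),
    (ys.foldl (pvStepA cnt) (s, h)).2 = (pvNew s ys).foldl (pvG cnt) h := by
  intro ys
  induction ys with
  | nil => intro s h; simp [pvNew]
  | cons x ys ih =>
    intro s h
    by_cases hx : x ∈ s
    · simp [pvNew, hx, pvStepA, ih]
    · simp [pvNew, hx, pvStepA, ih]

theorem pvUpdateNew : ∀ (ys s : List Int), PySem.Set.update s ys = s ++ pvNew s ys := by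
  intro ys
  induction ys with
  | nil => intro s; simp [PySem.Set.update_nil, pvNew]
  | cons x ys ih =>
    intro s
    rw [PySem.Set.update_cons]
    by_cases hx : x ∈ s
    · simp [pvNew, hx, ih]
    · simp [pvNew, hx, ih]

theorem pvOfListNew (xs : List Int) : PySem.Set.ofList xs = pvNew [] xs := by
  have h := pvUpdateNew xs []
  simpa [PySem.Set.update_nil_left] using h

-- ===== VERDICT (by name: the statement is the Claim_ definition above) =====
theorem check_common_elevation_spec : Claim_equal_check_common_elevation := by
  intro array _ _
  unfold Spec_check_common_elevation check_common_elevation check_common_elevation_alt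
  dsimp only
  rw [PySem.Dict.foldl_insert_getD_add_one_eq_counter, PySem.Dict.items_counter, List.foldl_map]
  rw [PySem.List.foldl_pyRange_zero_pyGetD' array 0
        (f := fun (p : List Int × Int) x =>
          if x ∈ p.1 then p
          else
            let counts := p.1 ++ [x]
            let c := (PySem.List.pyRange 0 (array.length : Int) 1).foldl
              (fun c j => if x = PySem.List.pyGetD array j 0 then c + 1 else c) (0 : Int)
            if c > 1 then (if p.2 < x then (counts, x) else (counts, p.2)) else (counts, p.2))]
  have hstep : (fun (p : List Int × Int) x =>
          if x ∈ p.1 then p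
          else
            let counts := p.1 ++ [x]
            let c := (PySem.List.pyRange 0 (array.length : Int) 1).foldl
              (fun c j => if x = PySem.List.pyGetD array j 0 then c + 1 else c) (0 : Int)
            if c > 1 then (if p.2 < x then (counts, x) else (counts, p.2)) else (counts, p.2))
      = pvStepA (fun x => array.count x) := by
    funext p x
    rw [PySem.List.foldl_pyRange_zero_pyGetD' array 0
          (f := fun c y => if x = y then c + 1 else c)]
    simp only [pvStepA, pvG, pvFoldCount]
    by_cases hx : x ∈ p.1
    · simp [hx]
    · simp only [hx, if_false]
      by_cases hc : 1 < array.count x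
      · have h1 : (0 : Int) + (array.count x : Int) > 1 := by omega
        simp only [if_pos h1, if_pos hc]
        split <;> rfl
      · have h1 : ¬ ((0 : Int) + (array.count x : Int) > 1) := by omega
        simp [h1, hc]
  rw [hstep, pvLemA, ← pvOfListNew]
  have hfun : (fun (r : Int) (k : Int) => if (array.count k : Int) > 1 ∧ k > r then k else r)
      = pvG (fun x => array.count x) := by
    funext r k
    simp only [pvG]
    split_ifs <;> omega
  rw [← hfun]
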